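-- pv_equiv track=rewrite | github.com/EricWui/CS61A | projects/cats/cats.py | sphinx_switches
-- ===== SOURCE A (Python) =====
-- def sphinx_switches(start, goal, limit):
--     """A diff function for autocorrect that determines how many letters
--     in START need to be substituted to create GOAL, then adds the difference in
--     their lengths and returns the result.
--
--     Arguments:
--         start: a starting word
--         goal: a string representing a desired goal word
--         limit: a number representing an upper bound on the number of chars that must change
--
--     >>> big_limit = 10
--     >>> sphinx_switches("nice", "rice", big_limit)    # Substitute: n -> r
--     1
--     >>> sphinx_switches("range", "rungs", big_limit)  # Substitute: a -> u, e -> s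
--     2
--     >>> sphinx_switches("pill", "pillage", big_limit) # Don't substitute anything, length difference of 3.
--     3
--     >>> sphinx_switches("roses", "arose", big_limit)  # Substitute: r -> a, o -> r, s -> o, e -> s, s -> e
--     5
--     >>> sphinx_switches("rose", "hello", big_limit)   # Substitute: r->h, o->e, s->l, e->l, length difference of 1.
--     5
--     """
--     # BEGIN PROBLEM 6
--     # assert False, 'Remove this line'
--     if len(start)==0:
--         return len(goal)
--     if len(goal)==0:
--         return len(start)
--     if limit< 0:
--         return 1
--     if start==goal:
--         return 0
--     elif start[0]==goal[0]:
--         return sphinx_switches(start[1:],goal[1:],limit)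
--     else:
--         return 1+sphinx_switches(start[1:],goal[1:],limit-1)
-- ===== SOURCE B (Python) =====
-- def sphinx_switches(start, goal, limit):
--     mism = 0
--     for a, b in zip(start, goal):
--         if limit - mism < 0:
--             return mism + 1
--         if a != b:
--             mism += 1
--     return mism + abs(len(start) - len(goal))
-- ===== Notes on version B (the rewrite author's own statement) =====
-- stated objective: faster
-- what changed: Replaces A's recursion with O(n) string slicing at every step by a single index/zip loop that counts mismatches and adds the length difference at the end.
import Mathlib
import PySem

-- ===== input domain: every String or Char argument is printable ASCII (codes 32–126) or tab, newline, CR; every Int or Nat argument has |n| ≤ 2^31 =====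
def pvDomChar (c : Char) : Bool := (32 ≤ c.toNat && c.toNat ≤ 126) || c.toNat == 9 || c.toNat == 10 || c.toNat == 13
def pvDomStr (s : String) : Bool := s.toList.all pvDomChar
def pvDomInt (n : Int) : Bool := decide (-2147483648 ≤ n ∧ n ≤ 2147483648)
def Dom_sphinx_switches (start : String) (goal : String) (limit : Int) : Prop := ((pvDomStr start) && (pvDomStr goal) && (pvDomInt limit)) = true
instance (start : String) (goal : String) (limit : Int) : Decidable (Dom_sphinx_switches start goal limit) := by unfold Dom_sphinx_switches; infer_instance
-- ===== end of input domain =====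

-- B replaces A's recursion with quadratic slicing by one linear mismatch-counting pass (objective: faster).

-- ===== PORT A =====
-- A's recursion on the strings; the two length==0 checks become the list patterns.
def sphinxA : List Char → List Char → Int → Int
  | [], g, _ => (g.length : Int)
  | s, [], _ => (s.length : Int)
  | a :: s, b :: g, limit =>
    if limit < 0 then 1
    else if a :: s = b :: g then 0
    else if a = b then sphinxA s g limit
    else 1 + sphinxA s g (limit - 1)

def sphinx_switches (start : String) (goal : String) (limit : Int) : Int :=
  sphinxA start.toList goal.toList limit

-- ===== PORT B =====
-- B's zip loop with mismatch accumulator; on exhaustion the leftover length is the abs length difference.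
def sphinxB : List Char → List Char → Int → Int → Int
  | a :: s, b :: g, limit, mism =>
    if limit - mism < 0 then mism + 1
    else if a ≠ b then sphinxB s g limit (mism + 1)
    else sphinxB s g limit mism
  | s, g, _, mism => mism + ((s.length : Int) - (g.length : Int)).natAbs

def sphinx_switches_alt (start : String) (goal : String) (limit : Int) : Int :=
  sphinxB start.toList goal.toList limit 0

-- ===== PRECONDITION & SPEC =====
def Spec_sphinx_switches (start : String) (goal : String) (limit : Int) (out : Int) : Prop := out = sphinx_switches_alt start goal limit
instance (start : String) (goal : String) (limit : Int) (out : Int) : Decidable (Spec_sphinx_switches start goal limit out) := by unfold Spec_sphinx_switches; infer_instance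

-- ===== CLAIM (what is proved, stated in full; the proofs are below) =====
def Claim_equal_sphinx_switches : Prop := ∀ (start : String) (goal : String) (limit : Int), Dom_sphinx_switches start goal limit → Spec_sphinx_switches start goal limit (sphinx_switches start goal limit)

-- ===== LEMMAS AND PROOFS =====

-- On equal lists with remaining budget, B returns the accumulator unchanged.
theorem sphinxB_self (s : List Char) : ∀ (limit mism : Int), 0 ≤ limit - mism →
    sphinxB s s limit mism = mism := by
  induction s with
  | nil => intro limit mism _; simp [sphinxB]
  | cons a s ih =>
    intro limit mism h
    simp only [sphinxB]
    rw [if_neg (by omega : ¬ limit - mism < 0), if_neg (by simp : ¬ a ≠ a)]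
    exact ih limit mism h

-- Main invariant: B with accumulator m equals m plus A with the reduced budget.
theorem sphinxB_eq (s : List Char) : ∀ (g : List Char) (limit mism : Int),
    sphinxB s g limit mism = mism + sphinxA s g (limit - mism) := by
  induction s with
  | nil =>
    intro g limit mism
    cases g <;> simp only [sphinxB, sphinxA, List.length_nil, List.length_cons] <;> omega
  | cons a s ih =>
    intro g limit mism
    cases g with
    | nil => simp only [sphinxB, sphinxA, List.length_nil, List.length_cons]; omega
    | cons b g =>
      simp only [sphinxB, sphinxA]
      by_cases hl : limit - mism < 0
      · rw [if_pos hl, if_pos hl]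
      · rw [if_neg hl, if_neg hl]
        by_cases hab : a = b
        · subst hab
          rw [if_neg (by simp : ¬ a ≠ a)]
          by_cases hsg : s = g
          · subst hsg
            rw [if_pos rfl, sphinxB_self s limit mism (by omega)]
            ring
          · rw [if_neg (by simp [hsg]), if_pos rfl]
            exact ih g limit mism
        · rw [if_pos (hab : a ≠ b), if_neg (by simp [hab]), if_neg hab]
          rw [ih g limit (mism + 1)]
          have h2 : limit - (mism + 1) = limit - mism - 1 := by ring
          rw [h2]
          ring

-- ===== VERDICT (by name: the statement is the Claim_ definition above) =====
theorem sphinx_switches_spec : Claim_equal_sphinx_switches := by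
  intro start goal limit _
  unfold Spec_sphinx_switches sphinx_switches sphinx_switches_alt
  rw [sphinxB_eq]
  simp
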